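-- pv_equiv track=rewrite | github.com/jayden5744/speech_transformer_pl | src/preprocess/preprocess.py | bracket_filter
-- ===== SOURCE A (Python) =====
-- def bracket_filter(sentence: str, mode: str = "phonetic") -> str:
--     # bracket 괄호를 제거 & phonetic or spelling 중 하나만 택
--     new_sentence = ""
--
--     if mode == "phonetic":
--         flag = False
--         for ch in sentence:
--             if ch == "(" and flag is False:
--                 flag = True
--
--             elif ch == "(" and flag is True:
--                 flag = False
--
--             elif ch != ")" and flag is False:
--                 new_sentence += ch
--
--     elif mode == "spelling":
--         flag = True
--         for ch in sentence:
--             if ch == "(":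
--                 continue
--
--             elif ch == ")" and flag is True:
--                 flag = False
--
--             elif ch == ")" and flag is False:
--                 flag = True
--
--             elif ch != ")" and flag is True:
--                 new_sentence += ch
--
--     else:
--         raise ValueError(f"Unsupported mode : {mode}")
--
--     return new_sentence
-- ===== SOURCE B (Python) =====
-- def bracket_filter(sentence: str, mode: str = "phonetic") -> str:
--     # bracket 괄호를 제거 & phonetic or spelling 중 하나만 택
--     if mode == "phonetic":
--         parts = sentence.replace(")", "").split("(")
--     elif mode == "spelling":
--         parts = sentence.replace("(", "").split(")")
--     else:
--         raise ValueError(f"Unsupported mode : {mode}")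
--     return "".join(part for i, part in enumerate(parts) if i % 2 == 0)
-- ===== Notes on version B (the rewrite author's own statement) =====
-- stated objective: simpler
-- what changed: Replaced the char-by-char toggle-flag state machine with a pipeline: delete the non-toggling paren type, split on the toggling one, and join the even-indexed segments.
import Mathlib
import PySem

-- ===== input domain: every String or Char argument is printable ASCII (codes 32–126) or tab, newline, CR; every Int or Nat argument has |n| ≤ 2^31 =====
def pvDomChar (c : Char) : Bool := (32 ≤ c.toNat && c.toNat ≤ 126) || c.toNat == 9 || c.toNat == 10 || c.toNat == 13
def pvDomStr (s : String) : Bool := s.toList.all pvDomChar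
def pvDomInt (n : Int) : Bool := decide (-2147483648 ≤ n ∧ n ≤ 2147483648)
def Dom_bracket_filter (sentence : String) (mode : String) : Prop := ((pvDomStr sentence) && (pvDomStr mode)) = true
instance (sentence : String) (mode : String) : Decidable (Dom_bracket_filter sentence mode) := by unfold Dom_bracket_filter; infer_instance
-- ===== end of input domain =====

-- B replaces A's char-by-char toggle-flag state machine by a pipeline (delete one paren
-- type, split on the other, join the even-indexed segments): simpler, same cost.

-- ===== PORT A =====
-- the loop bodies of A's two for-loops, named so the proofs can speak about one step
def pvStepPhon (st : Bool × List Char) (ch : Char) : Bool × List Char :=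
  if ch == '(' && st.1 == false then (true, st.2)
  else if ch == '(' && st.1 == true then (false, st.2)
  else if ch != ')' && st.1 == false then (st.1, st.2 ++ [ch])
  else st

def pvStepSpell (st : Bool × List Char) (ch : Char) : Bool × List Char :=
  if ch == '(' then st
  else if ch == ')' && st.1 == true then (false, st.2)
  else if ch == ')' && st.1 == false then (true, st.2)
  else if ch != ')' && st.1 == true then (st.1, st.2 ++ [ch])
  else st

def bracket_filter (sentence : String) (mode : String) : String :=
  let new_sentence : List Char := []
  if mode == "phonetic" then
    let st := sentence.toList.foldl pvStepPhon (false, new_sentence)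
    String.ofList st.2
  else if mode == "spelling" then
    let st := sentence.toList.foldl pvStepSpell (true, new_sentence)
    String.ofList st.2
  else
    ""  -- Python raises ValueError here; excluded by Pre_bracket_filter

-- ===== PORT B =====
def bracket_filter_alt (sentence : String) (mode : String) : String :=
  if mode == "phonetic" then
    let parts := PySem.Chars.splitOn (PySem.Chars.replace sentence.toList [')'] []) ['(']
    String.ofList (PySem.Chars.join []
      (((PySem.List.enumerate parts).filter (fun p => PySem.Int.mod p.1 2 == 0)).map (·.2)))
  else if mode == "spelling" then
    let parts := PySem.Chars.splitOn (PySem.Chars.replace sentence.toList ['('] []) [')']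
    String.ofList (PySem.Chars.join []
      (((PySem.List.enumerate parts).filter (fun p => PySem.Int.mod p.1 2 == 0)).map (·.2)))
  else
    ""  -- Python raises ValueError here; excluded by Pre_bracket_filter

-- ===== PRECONDITION & SPEC =====
-- Pre_ admits exactly the two modes on which A returns; on any other mode A raises ValueError.
def Pre_bracket_filter (sentence : String) (mode : String) : Prop :=
  mode = "phonetic" ∨ mode = "spelling"
instance (sentence : String) (mode : String) : Decidable (Pre_bracket_filter sentence mode) := by
  unfold Pre_bracket_filter; infer_instance

def pvWitness_bracket_filter : String × String := ("a(b)c(d", "phonetic")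

def Spec_bracket_filter (sentence : String) (mode : String) (out : String) : Prop := out = bracket_filter_alt sentence mode
instance (sentence : String) (mode : String) (out : String) : Decidable (Spec_bracket_filter sentence mode out) := by unfold Spec_bracket_filter; infer_instance

-- ===== CLAIM (what is proved, stated in full; the proofs are below) =====
def Claim_equal_bracket_filter : Prop := ∀ (sentence : String) (mode : String), Dom_bracket_filter sentence mode → Pre_bracket_filter sentence mode → Spec_bracket_filter sentence mode (bracket_filter sentence mode)

-- ===== LEMMAS AND PROOFS =====

-- The common abstraction of A's two loops: `keep` starts true, char `t` toggles it,
-- char `d` is always dropped, any other char is kept iff `keep`.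
def mach (t d : Char) (keep : Bool) : List Char → List Char
  | [] => []
  | c :: cs =>
    if c = t then mach t d (!keep) cs
    else if c = d then mach t d keep cs
    else (if keep then [c] else []) ++ mach t d keep cs

-- Functional form of splitting a char list on a single separator char.
def mySplit (t : Char) : List Char → List (List Char)
  | [] => [[]]
  | c :: cs => if c = t then [] :: mySplit t cs else (mySplit t cs).modifyHead (c :: ·)

-- Keep the segments of alternating parity, starting with `b`.
def takeAlt : Bool → List (List Char) → List Char
  | _, [] => []
  | b, p :: ps => (if b then p else []) ++ takeAlt (!b) ps

theorem mySplit_ne_nil (t : Char) (cs : List Char) : mySplit t cs ≠ [] := by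
  induction cs with
  | nil => simp [mySplit]
  | cons c cs ih =>
    simp only [mySplit]
    split
    · simp
    · cases h : mySplit t cs with
      | nil => exact absurd h ih
      | cons a l => simp [h]

theorem replace_go_single (d : Char) (fuel : Nat) :
    ∀ (l acc : List Char), l.length ≤ fuel →
      PySem.Chars.replace.go [d] [] fuel l acc = acc.reverse ++ l.filter (· ≠ d) := by
  induction fuel with
  | zero =>
    intro l acc h
    have : l = [] := List.length_eq_zero_iff.mp (Nat.le_zero.mp h)
    subst this
    simp [PySem.Chars.replace.go]
  | succ fuel ih =>
    intro l acc h
    cases l with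
    | nil => simp [PySem.Chars.replace.go]
    | cons c rest =>
      simp only [PySem.Chars.replace.go]
      by_cases hc : c = d
      · subst hc
        simp only [List.isPrefixOf, List.isPrefixOf_nil_left, BEq.rfl, Bool.true_and, if_pos]
        rw [ih _ _ (by simpa using Nat.le_of_succ_le_succ h)]
        simp [List.filter_cons]
      · have hp : [d].isPrefixOf (c :: rest) = false := by
          simp [List.isPrefixOf]
          intro hdc; exact absurd hdc.symm hc
        rw [hp, if_neg Bool.false_ne_true]
        rw [ih rest (c :: acc) (by simpa using Nat.le_of_succ_le_succ h)]
        simp [List.filter_cons, hc]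

theorem replace_single (d : Char) (cs : List Char) :
    PySem.Chars.replace cs [d] [] = cs.filter (· ≠ d) := by
  simp only [PySem.Chars.replace]
  rw [if_neg (by simp)]
  simpa using replace_go_single d cs.length cs [] (le_refl _)

theorem splitOn_go_single (t : Char) (fuel : Nat) :
    ∀ (l cur : List Char) (acc : List (List Char)), l.length ≤ fuel →
      PySem.Chars.splitOn.go [t] fuel l cur acc
        = acc.reverse ++ (mySplit t l).modifyHead (cur.reverse ++ ·) := by
  induction fuel with
  | zero =>
    intro l cur acc h
    have : l = [] := List.length_eq_zero_iff.mp (Nat.le_zero.mp h)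
    subst this
    simp [PySem.Chars.splitOn.go, mySplit]
  | succ fuel ih =>
    intro l cur acc h
    cases l with
    | nil => simp [PySem.Chars.splitOn.go, mySplit]
    | cons c rest =>
      simp only [PySem.Chars.splitOn.go]
      by_cases hc : c = t
      · subst hc
        simp only [List.isPrefixOf, List.isPrefixOf_nil_left, BEq.rfl, Bool.true_and, if_pos]
        have hdrop : List.drop [c].length (c :: rest) = rest := by simp
        rw [hdrop, ih rest [] (cur.reverse :: acc) (by simpa using Nat.le_of_succ_le_succ h)]
        simp only [mySplit, if_pos rfl, List.modifyHead_cons, List.reverse_cons,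
          List.reverse_nil, List.nil_append, List.append_assoc, List.cons_append]
        cases hms : mySplit c rest <;> simp
      · have hp : [t].isPrefixOf (c :: rest) = false := by
          simp [List.isPrefixOf]
          intro hdc; exact absurd hdc.symm hc
        rw [hp, if_neg Bool.false_ne_true]
        rw [ih rest (c :: cur) acc (by simpa using Nat.le_of_succ_le_succ h)]
        simp only [mySplit, if_neg hc]
        obtain ⟨a, l', hl⟩ : ∃ a l', mySplit t rest = a :: l' := by
          cases h : mySplit t rest with
          | nil => exact absurd h (mySplit_ne_nil t rest)
          | cons a l' => exact ⟨a, l', rfl⟩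
        simp [hl]

theorem splitOn_single (t : Char) (cs : List Char) :
    PySem.Chars.splitOn cs [t] = mySplit t cs := by
  simp only [PySem.Chars.splitOn]
  rw [splitOn_go_single t _ cs [] [] (by omega)]
  obtain ⟨a, l', hl⟩ : ∃ a l', mySplit t cs = a :: l' := by
    cases h : mySplit t cs with
    | nil => exact absurd h (mySplit_ne_nil t cs)
    | cons a l' => exact ⟨a, l', rfl⟩
  simp [hl]

theorem mach_eq_takeAlt (t d : Char) (hne : t ≠ d) :
    ∀ (cs : List Char) (keep : Bool),
      mach t d keep cs = takeAlt keep (mySplit t (cs.filter (· ≠ d))) := by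
  intro cs
  induction cs with
  | nil => intro keep; simp [mach, mySplit, takeAlt]
  | cons c cs ih =>
    intro keep
    by_cases hd : c = d
    · have ht' : ¬ c = t := fun h => hne (h ▸ hd)
      simp only [mach, if_neg ht', if_pos hd]
      rw [ih keep]
      simp [List.filter_cons, hd]
    · by_cases ht : c = t
      · simp only [mach, if_pos ht]
        rw [ih (!keep)]
        simp only [List.filter_cons, hd, decide_not, decide_false]
        simp only [ne_eq, hd, not_false_eq_true, decide_true, Bool.not_false, if_pos]
        simp only [mySplit, if_pos ht, takeAlt]
        cases keep <;> simp
      · simp only [mach, if_neg ht, if_neg hd]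
        rw [ih keep]
        simp only [List.filter_cons, ne_eq, hd, not_false_eq_true, decide_true, if_pos]
        simp only [mySplit, if_neg ht]
        obtain ⟨a, l', hl⟩ : ∃ a l', mySplit t (cs.filter (· ≠ d)) = a :: l' := by
          cases h : mySplit t (cs.filter (· ≠ d)) with
          | nil => exact absurd h (mySplit_ne_nil t _)
          | cons a l' => exact ⟨a, l', rfl⟩
        simp only [hl, List.modifyHead_cons, takeAlt]
        cases keep <;> simp

theorem join_nil_eq_flatten (l : List (List Char)) : PySem.Chars.join [] l = l.flatten := by
  induction l with
  | nil => simp [PySem.Chars.join, List.intercalate]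
  | cons a l ih =>
    cases l with
    | nil => simp [PySem.Chars.join, List.intercalate]
    | cons b l' =>
      rw [PySem.Chars.join_cons_cons, ih]
      simp

theorem sel_eq_takeAlt (parts : List (List Char)) :
    ∀ (n : Int), 0 ≤ n →
      (((PySem.List.enumerate parts n).filter (fun p => PySem.Int.mod p.1 2 == 0)).map (·.2)).flatten
        = takeAlt (PySem.Int.mod n 2 == 0) parts := by
  induction parts with
  | nil => intro n _; simp [PySem.List.enumerate_nil, takeAlt]
  | cons p ps ih =>
    intro n hn
    rw [PySem.List.enumerate_cons]
    have hmod : PySem.Int.mod n 2 = n % 2 := PySem.Int.mod_eq_emod_of_pos (by omega)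
    have hmod1 : PySem.Int.mod (n + 1) 2 = (n + 1) % 2 := PySem.Int.mod_eq_emod_of_pos (by omega)
    simp only [List.filter_cons, takeAlt]
    by_cases h : n % 2 = 0
    · have hb : (n % 2 == 0) = true := by simpa using h
      have hb1 : ((n + 1) % 2 == 0) = false := by simpa using (by omega : ¬ (n + 1) % 2 = 0)
      rw [hmod]
      simp only [hb, if_true, List.map_cons, List.flatten_cons, Bool.not_true]
      rw [ih (n + 1) (by omega), hmod1, hb1]
    · have hb : (n % 2 == 0) = false := by simpa using h
      have hb1 : ((n + 1) % 2 == 0) = true := by simpa using (by omega : (n + 1) % 2 = 0)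
      rw [hmod]
      simp only [hb, Bool.false_eq_true, if_false, Bool.not_false]
      rw [ih (n + 1) (by omega), hmod1, hb1]
      simp

theorem foldl_phonetic (cs : List Char) :
    ∀ (flag : Bool) (acc : List Char),
      (cs.foldl pvStepPhon (flag, acc)).2 = acc ++ mach '(' ')' (!flag) cs := by
  induction cs with
  | nil => intro flag acc; simp [mach]
  | cons c cs ih =>
    intro flag acc
    rw [List.foldl_cons]
    by_cases hp : c = '('
    · subst hp
      cases flag
      · rw [show pvStepPhon (false, acc) '(' = (true, acc) from by simp [pvStepPhon], ih]
        simp [mach]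
      · rw [show pvStepPhon (true, acc) '(' = (false, acc) from by simp [pvStepPhon], ih]
        simp [mach]
    · by_cases hq : c = ')'
      · subst hq
        cases flag
        · rw [show pvStepPhon (false, acc) ')' = (false, acc) from by simp [pvStepPhon], ih]
          simp [mach]
        · rw [show pvStepPhon (true, acc) ')' = (true, acc) from by simp [pvStepPhon], ih]
          simp [mach]
      · cases flag
        · rw [show pvStepPhon (false, acc) c = (false, acc ++ [c]) from by
            simp [pvStepPhon, hp, hq], ih]
          simp [mach, hp, hq]
        · rw [show pvStepPhon (true, acc) c = (true, acc) from by simp [pvStepPhon, hp, hq], ih]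
          simp [mach, hp, hq]

theorem foldl_spelling (cs : List Char) :
    ∀ (flag : Bool) (acc : List Char),
      (cs.foldl pvStepSpell (flag, acc)).2 = acc ++ mach ')' '(' flag cs := by
  induction cs with
  | nil => intro flag acc; simp [mach]
  | cons c cs ih =>
    intro flag acc
    rw [List.foldl_cons]
    by_cases hp : c = '('
    · subst hp
      rw [show pvStepSpell (flag, acc) '(' = (flag, acc) from by simp [pvStepSpell], ih]
      simp [mach]
    · by_cases hq : c = ')'
      · subst hq
        cases flag
        · rw [show pvStepSpell (false, acc) ')' = (true, acc) from by simp [pvStepSpell, hp], ih]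
          simp [mach, hp]
        · rw [show pvStepSpell (true, acc) ')' = (false, acc) from by simp [pvStepSpell, hp], ih]
          simp [mach, hp]
      · cases flag
        · rw [show pvStepSpell (false, acc) c = (false, acc) from by
            simp [pvStepSpell, hp, hq], ih]
          simp [mach, hp, hq]
        · rw [show pvStepSpell (true, acc) c = (true, acc ++ [c]) from by
            simp [pvStepSpell, hp, hq], ih]
          simp [mach, hp, hq]

theorem alt_char_eq (t d : Char) (hne : t ≠ d) (cs : List Char) :
    PySem.Chars.join []
      (((PySem.List.enumerate (PySem.Chars.splitOn (PySem.Chars.replace cs [d] []) [t]) 0).filter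
        (fun p => PySem.Int.mod p.1 2 == 0)).map (·.2))
      = mach t d true cs := by
  rw [replace_single, splitOn_single, join_nil_eq_flatten,
    sel_eq_takeAlt _ 0 (by omega)]
  rw [mach_eq_takeAlt t d hne]
  norm_num

-- ===== VERDICT (by name: the statement is the Claim_ definition above) =====
theorem bracket_filter_spec : Claim_equal_bracket_filter := by
  intro sentence mode _ hpre
  unfold Spec_bracket_filter bracket_filter bracket_filter_alt
  rcases hpre with h | h <;> subst h
  · simp only [beq_self_eq_true, if_pos]
    rw [foldl_phonetic]
    rw [alt_char_eq '(' ')' (by decide)]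
    simp
  · have : ("spelling" == "phonetic") = false := by decide
    simp only [this, Bool.false_eq_true, if_neg, if_false, beq_self_eq_true, if_pos]
    rw [foldl_spelling]
    rw [alt_char_eq ')' '(' (by decide)]
    simp
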